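-- pv_equiv track=rewrite | github.com/Keyshawn-Reid/vintage-pricer | src/hysteric_features.py | map_condition
-- ===== SOURCE A (Python) =====
-- def map_condition(raw: str) -> int:
--     if not isinstance(raw, str):
--         return 3
--     t = raw.lower().strip()
--     if any(k in t for k in ["brand new", "new with tags", "nwt", "deadstock", "new"]):
--         return 5
--     if any(k in t for k in ["new (other)", "new without tags"]):
--         return 4
--     if any(k in t for k in ["gently used", "gently worn", "pre-owned"]):
--         return 3
--     if "used" in t:
--         return 2
--     if any(k in t for k in ["for parts", "flaw", "worn", "damaged"]):
--         return 1
--     return 3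
-- ===== SOURCE B (Python) =====
-- # One flat keyword list with priorities: collect ALL matches, then aggregate with min,
-- # instead of testing rule groups in order with early returns.
-- RULES = [
--     ("brand new", 0, 5), ("new with tags", 0, 5), ("nwt", 0, 5),
--     ("deadstock", 0, 5), ("new", 0, 5),
--     ("new (other)", 1, 4), ("new without tags", 1, 4),
--     ("gently used", 2, 3), ("gently worn", 2, 3), ("pre-owned", 2, 3),
--     ("used", 3, 2),
--     ("for parts", 4, 1), ("flaw", 4, 1), ("worn", 4, 1), ("damaged", 4, 1),
-- ]
--
-- def map_condition(raw: str) -> int: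
--     if not isinstance(raw, str):
--         return 3
--     t = raw.lower().strip()
--     hits = [(pri, score) for kw, pri, score in RULES if kw in t]
--     return min(hits)[1] if hits else 3
-- ===== Notes on version B (the rewrite author's own statement) =====
-- stated objective: alternative
-- what changed: Instead of testing rule groups in order with early returns, B scans one flat keyword list, collects every matching (priority, score) pair, and aggregates with min to pick the highest-priority match (default 3).
import Mathlib
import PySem

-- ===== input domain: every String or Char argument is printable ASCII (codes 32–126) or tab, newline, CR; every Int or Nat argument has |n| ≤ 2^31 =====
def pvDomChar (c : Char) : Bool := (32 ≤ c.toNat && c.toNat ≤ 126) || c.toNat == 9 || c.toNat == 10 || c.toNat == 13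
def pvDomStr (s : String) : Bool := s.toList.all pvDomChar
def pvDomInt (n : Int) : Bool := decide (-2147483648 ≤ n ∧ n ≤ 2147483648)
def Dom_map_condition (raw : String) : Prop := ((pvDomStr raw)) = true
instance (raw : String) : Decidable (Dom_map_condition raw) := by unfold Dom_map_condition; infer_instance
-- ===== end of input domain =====

-- B scans one flat keyword list, collects all (priority, score) matches and aggregates with min, instead of A's ordered early-return cascade; same values, alternative structure.

-- ===== PORT A =====
def map_condition (raw : String) : Int :=
  let t := PySem.Str.strip (PySem.Str.lower raw)
  if (["brand new", "new with tags", "nwt", "deadstock", "new"].any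
       (fun k => PySem.Str.isIn k t)) then 5
  else if (["new (other)", "new without tags"].any (fun k => PySem.Str.isIn k t)) then 4
  else if (["gently used", "gently worn", "pre-owned"].any (fun k => PySem.Str.isIn k t)) then 3
  else if PySem.Str.isIn "used" t then 2
  else if (["for parts", "flaw", "worn", "damaged"].any (fun k => PySem.Str.isIn k t)) then 1
  else 3

-- ===== PORT B =====
def condRules : List (String × Int × Int) :=
  [ ("brand new", 0, 5), ("new with tags", 0, 5), ("nwt", 0, 5),
    ("deadstock", 0, 5), ("new", 0, 5),
    ("new (other)", 1, 4), ("new without tags", 1, 4),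
    ("gently used", 2, 3), ("gently worn", 2, 3), ("pre-owned", 2, 3),
    ("used", 3, 2),
    ("for parts", 4, 1), ("flaw", 4, 1), ("worn", 4, 1), ("damaged", 4, 1) ]

-- Python's min on a list of int pairs: first lexicographically smallest element.
def pairMin (a b : Int × Int) : Int × Int :=
  if b.1 < a.1 ∨ (b.1 = a.1 ∧ b.2 < a.2) then b else a

def map_condition_alt (raw : String) : Int :=
  let t := PySem.Str.strip (PySem.Str.lower raw)
  let hits := (condRules.filter (fun r => PySem.Str.isIn r.1 t)).map (fun r => r.2)
  match hits with
  | [] => 3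
  | h :: rest => (rest.foldl pairMin h).2

-- ===== PRECONDITION & SPEC =====
def Spec_map_condition (raw : String) (out : Int) : Prop := out = map_condition_alt raw
instance (raw : String) (out : Int) : Decidable (Spec_map_condition raw out) := by unfold Spec_map_condition; infer_instance

-- ===== CLAIM (what is proved, stated in full; the proofs are below) =====
def Claim_equal_map_condition : Prop := ∀ (raw : String), Dom_map_condition raw → Spec_map_condition raw (map_condition raw)

-- ===== LEMMAS AND PROOFS =====

-- the "not smaller than" relation used by pairMin
def pvR (a b : Int × Int) : Prop := ¬ (b.1 < a.1 ∨ (b.1 = a.1 ∧ b.2 < a.2))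

theorem pv_foldl_pairMin_fixed (l : List (Int × Int)) (a : Int × Int)
    (h : ∀ x ∈ l, pvR a x) : l.foldl pairMin a = a := by
  induction l with
  | nil => rfl
  | cons x xs ih =>
      have hx : pvR a x := h x (by simp)
      have : pairMin a x = a := by
        unfold pairMin
        exact if_neg hx
      simp only [List.foldl_cons, this]
      exact ih (fun y hy => h y (by simp [hy]))

theorem pv_hits_pairwise (p : String × Int × Int → Bool) :
    ((condRules.filter p).map (fun r => r.2)).Pairwise pvR := by
  have hsub : ((condRules.filter p).map (fun r => r.2)).Sublist
      (condRules.map (fun r => r.2)) :=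
    (List.filter_sublist (l := condRules)).map _
  have hall : (condRules.map (fun r => r.2)).Pairwise pvR := by
    unfold condRules pvR; decide
  exact hall.sublist hsub

theorem pv_min_eq_head (p : String × Int × Int → Bool) :
    (match (condRules.filter p).map (fun r => r.2) with
     | [] => (3 : Int)
     | h :: rest => (rest.foldl pairMin h).2) =
    (match (condRules.filter p).map (fun r => r.2) with
     | [] => (3 : Int)
     | h :: _ => h.2) := by
  have hp := pv_hits_pairwise p
  cases hl : (condRules.filter p).map (fun r => r.2) with
  | nil => rfl
  | cons h rest =>
      rw [hl] at hp
      show (rest.foldl pairMin h).2 = h.2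
      rw [pv_foldl_pairMin_fixed rest h (List.pairwise_cons.mp hp).1]

-- first-match recursion used only to restate B's head-of-filter linearly
def pvFirstScore (p : String × Int × Int → Bool) (l : List (String × Int × Int)) : Int :=
  match l with
  | [] => 3
  | r :: rest => if p r then r.2.2 else pvFirstScore p rest

theorem pv_firstScore_eq (p : String × Int × Int → Bool) (l : List (String × Int × Int)) :
    (match (l.filter p).map (fun r => r.2) with
     | [] => (3 : Int)
     | h :: _ => h.2) = pvFirstScore p l := by
  induction l with
  | nil => rfl
  | cons x xs ih => by_cases h : p x <;> simp [pvFirstScore, h, ih]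

-- ===== VERDICT (by name: the statement is the Claim_ definition above) =====
theorem map_condition_spec : Claim_equal_map_condition := by
  intro raw _
  unfold Spec_map_condition map_condition map_condition_alt
  generalize PySem.Str.strip (PySem.Str.lower raw) = t
  rw [pv_min_eq_head (fun r => PySem.Str.isIn r.1 t),
      pv_firstScore_eq (fun r => PySem.Str.isIn r.1 t) condRules]
  simp only [pvFirstScore, condRules, List.any_cons, List.any_nil]
  by_cases h1 : PySem.Str.isIn "brand new" t
  · simp_all
  by_cases h2 : PySem.Str.isIn "new with tags" t
  · simp_all
  by_cases h3 : PySem.Str.isIn "nwt" t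
  · simp_all
  by_cases h4 : PySem.Str.isIn "deadstock" t
  · simp_all
  by_cases h5 : PySem.Str.isIn "new" t
  · simp_all
  by_cases h6 : PySem.Str.isIn "new (other)" t
  · simp_all
  by_cases h7 : PySem.Str.isIn "new without tags" t
  · simp_all
  by_cases h8 : PySem.Str.isIn "gently used" t
  · simp_all
  by_cases h9 : PySem.Str.isIn "gently worn" t
  · simp_all
  by_cases h10 : PySem.Str.isIn "pre-owned" t
  · simp_all
  by_cases h11 : PySem.Str.isIn "used" t
  · simp_all
  by_cases h12 : PySem.Str.isIn "for parts" t
  · simp_all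
  by_cases h13 : PySem.Str.isIn "flaw" t
  · simp_all
  by_cases h14 : PySem.Str.isIn "worn" t
  · simp_all
  by_cases h15 : PySem.Str.isIn "damaged" t
  · simp_all
  simp_all
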